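-- pv_equiv track=rewrite | github.com/tuyetanh0207/AI-1 | man_A_Star.py | heuristic_Matrix
-- ===== SOURCE A (Python) =====
-- def manhattan_Heuristic_Funct (X,Y): #X,Y: tọa độ 2 điểm trên không gian 2 chiều (bản đồ)
--     dist = abs(Y[0] - X[0]) + abs(Y[1] - X[1])
--     return dist
--
-- def heuristic_Matrix (matrix, des): #matrix: ma trận 2 chiều (bản đồ) đọc từ file, des: điểm thoát exit cần tìm
--     heu_Matrix = []
--     new = []
--     for i in range(len(matrix)):
--         for j in range(len(matrix[0])):
--             new.append(0)
--         heu_Matrix.append(new)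
--         new=[]
--     for i in range(len(heu_Matrix)):
--         for j in range (len(heu_Matrix[0])):
--             heu_Matrix[i][j] = manhattan_Heuristic_Funct((i,j), des)
--     return heu_Matrix #Ma trận gồm các giá trị hàm heuristic để ước lượng khoảng cách từ điểm có tọa độ bất kì trên bản đồ đến điểm thoát exit
-- ===== SOURCE B (Python) =====
-- def heuristic_Matrix(matrix, des):
--     if not matrix:
--         return []
--     row_d = [abs(i - des[0]) for i in range(len(matrix))]
--     col_d = [abs(j - des[1]) for j in range(len(matrix[0]))]
--     return [[r + c for c in col_d] for r in row_d]
-- ===== Notes on version B (the rewrite author's own statement) =====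
-- stated objective: simpler
-- what changed: Replaces the build-a-zero-matrix-then-overwrite-each-cell two-phase loop with a separable construction: precompute 1D row and column distance tables once and assemble each cell as row_d[i]+col_d[j] in a single comprehension.
import Mathlib
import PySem

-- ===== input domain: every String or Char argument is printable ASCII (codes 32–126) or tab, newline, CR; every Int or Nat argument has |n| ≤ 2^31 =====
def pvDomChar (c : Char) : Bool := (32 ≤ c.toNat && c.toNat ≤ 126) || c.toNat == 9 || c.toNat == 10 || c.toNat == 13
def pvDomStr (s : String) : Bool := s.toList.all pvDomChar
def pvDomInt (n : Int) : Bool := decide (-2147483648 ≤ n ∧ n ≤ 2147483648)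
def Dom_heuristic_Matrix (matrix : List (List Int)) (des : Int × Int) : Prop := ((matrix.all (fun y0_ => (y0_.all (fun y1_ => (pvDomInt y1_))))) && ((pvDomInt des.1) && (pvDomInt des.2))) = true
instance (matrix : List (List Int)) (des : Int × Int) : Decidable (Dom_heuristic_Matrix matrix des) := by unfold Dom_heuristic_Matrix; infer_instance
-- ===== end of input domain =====

-- B builds the matrix from two precomputed 1D distance tables (separable Manhattan
-- distance) instead of A's zero-matrix-then-overwrite two-phase loops; objective: simpler.

-- ===== PORT A =====
-- abs(Y[0]-X[0]) + abs(Y[1]-X[1])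
def manhattan_Heuristic_Funct (X Y : Int × Int) : Int :=
  |Y.1 - X.1| + |Y.2 - X.2|

def heuristic_Matrix (matrix : List (List Int)) (des : Int × Int) : List (List Int) :=
  -- phase 1: build the zero matrix by appending rows of appended zeros
  let heu : List (List Int) :=
    (PySem.List.pyRange 0 (matrix.length : Int) 1).foldl
      (fun acc _i =>
        let row : List Int :=
          (PySem.List.pyRange 0 ((matrix.headD []).length : Int) 1).foldl
            (fun r _j => r ++ [(0 : Int)]) []
        acc ++ [row]) []
  -- phase 2: overwrite every cell heu_Matrix[i][j] in place
  (PySem.List.pyRange 0 (heu.length : Int) 1).foldl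
    (fun h i =>
      (PySem.List.pyRange 0 (((h.headD []).length : Int)) 1).foldl
        (fun h' j =>
          h'.set i.toNat ((h'.getD i.toNat []).set j.toNat
            (manhattan_Heuristic_Funct (i, j) des))) h) heu

-- ===== PORT B =====
def heuristic_Matrix_alt (matrix : List (List Int)) (des : Int × Int) : List (List Int) :=
  if matrix = [] then []
  else
    let row_d : List Int := (List.range matrix.length).map (fun (i : Nat) => |(i : Int) - des.1|)
    let col_d : List Int := (List.range (matrix.headD []).length).map (fun (j : Nat) => |(j : Int) - des.2|)
    row_d.map (fun r => col_d.map (fun c => r + c))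

-- ===== PRECONDITION & SPEC =====
def Spec_heuristic_Matrix (matrix : List (List Int)) (des : Int × Int) (out : List (List Int)) : Prop := out = heuristic_Matrix_alt matrix des
instance (matrix : List (List Int)) (des : Int × Int) (out : List (List Int)) : Decidable (Spec_heuristic_Matrix matrix des out) := by unfold Spec_heuristic_Matrix; infer_instance

-- ===== CLAIM (what is proved, stated in full; the proofs are below) =====
def Claim_equal_heuristic_Matrix : Prop := ∀ (matrix : List (List Int)) (des : Int × Int), Dom_heuristic_Matrix matrix des → Spec_heuristic_Matrix matrix des (heuristic_Matrix matrix des)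

-- ===== LEMMAS AND PROOFS =====

-- appending a constant element once per loop iteration yields init ++ replicate
theorem foldl_append_const {α β : Type} (x : α) :
    ∀ (l : List β) (init : List α),
      l.foldl (fun acc _ => acc ++ [x]) init = init ++ List.replicate l.length x := by
  intro l
  induction l with
  | nil => intro init; simp
  | cons b t ih =>
    intro init
    simp [List.foldl_cons, ih, List.replicate_succ]

-- writing g j into slot j for j = 0..n-1 replaces the first n entries by map g
theorem foldl_set_prefix {α : Type} (g : Nat → α) :
    ∀ (n : Nat) (l : List α), n ≤ l.length →
      (List.range n).foldl (fun acc j => acc.set j (g j)) l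
        = (List.range n).map g ++ l.drop n := by
  intro n
  induction n with
  | zero => intro l _; simp
  | succ k ih =>
    intro l hl
    have hk : k ≤ l.length := Nat.le_of_succ_le hl
    have hklt : k < l.length := hl
    rw [List.range_succ, List.foldl_append, ih l hk]
    have hlen : ((List.range k).map g).length = k := by simp
    rw [List.foldl_cons, List.foldl_nil]
    rw [List.set_append_right _ _ (by omega)]
    have hdrop : l.drop k = l[k] :: l.drop (k + 1) := List.drop_eq_getElem_cons hklt
    rw [hlen, Nat.sub_self, hdrop, List.set_cons_zero]
    simp

-- a fold that only ever rewrites row k factors through that row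
theorem foldl_set_nested (k : Nat) (f : Int → Int → List Int → List Int) :
    ∀ (js : List Int) (h : List (List Int)), k < h.length →
      js.foldl (fun h' j => h'.set k (f j 0 (h'.getD k []))) h
        = h.set k (js.foldl (fun r j => f j 0 r) (h.getD k [])) := by
  intro js
  induction js with
  | nil =>
    intro h hk
    simp [List.getD_eq_getElem?_getD, List.getElem?_eq_getElem hk, List.set_getElem_self]
  | cons j t ih =>
    intro h hk
    rw [List.foldl_cons, List.foldl_cons]
    rw [ih _ (by simpa using hk)]
    have h1 : (h.set k (f j 0 (h.getD k []))).getD k [] = f j 0 (h.getD k []) := by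
      simp [List.getD_eq_getElem?_getD, hk]
    rw [h1, List.set_set]

-- fold congruence under an invariant
theorem foldl_congr_inv {α β : Type} (inv : α → Prop) (f f' : α → β → α) :
    ∀ (l : List β) (a : α), inv a →
      (∀ x b, inv x → b ∈ l → f x b = f' x b ∧ inv (f' x b)) →
      l.foldl f a = l.foldl f' a := by
  intro l
  induction l with
  | nil => intro a _ _; rfl
  | cons b t ih =>
    intro a ha hstep
    obtain ⟨heq, hinv⟩ := hstep a b ha (by simp)
    rw [List.foldl_cons, List.foldl_cons, heq]
    exact ih _ hinv (fun x b' hx hb' => hstep x b' hx (by simp [hb']))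

-- pyRange 0 k 1 is List.range with a cast
theorem pyRange_zero_cast (k : Nat) :
    PySem.List.pyRange 0 (k : Int) 1 = (List.range k).map (fun (t : Nat) => (t : Int)) := by
  rw [PySem.List.pyRange_one]
  simp only [Int.sub_zero, Int.toNat_natCast, zero_add]

-- the second phase of A: overwriting each cell of a rectangular matrix yields a map
theorem phase2_eq (des : Int × Int) (m n : Nat) (h0 : List (List Int))
    (hlen : h0.length = m) (hrows : ∀ r ∈ h0, r.length = n) :
    (PySem.List.pyRange 0 (m : Int) 1).foldl
      (fun h i =>
        (PySem.List.pyRange 0 (((h.headD []).length : Int)) 1).foldl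
          (fun h' j =>
            h'.set i.toNat ((h'.getD i.toNat []).set j.toNat
              (manhattan_Heuristic_Funct (i, j) des))) h) h0
      = (List.range m).map (fun (i : Nat) =>
          (List.range n).map (fun (j : Nat) => |des.1 - (i : Int)| + |des.2 - (j : Int)|)) := by
  rw [pyRange_zero_cast m, List.foldl_map]
  have hstep : ∀ (x : List (List Int)) (y : Nat),
      (x.length = m ∧ ∀ r ∈ x, r.length = n) → y ∈ List.range m →
      ((PySem.List.pyRange 0 (((x.headD []).length : Int)) 1).foldl
          (fun h' j =>
            h'.set ((y : Int)).toNat ((h'.getD ((y : Int)).toNat []).set j.toNat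
              (manhattan_Heuristic_Funct ((y : Int), j) des))) x
        = x.set y ((List.range n).map (fun (j : Nat) => |des.1 - (y : Int)| + |des.2 - (j : Int)|)))
      ∧ ((x.set y ((List.range n).map (fun (j : Nat) => |des.1 - (y : Int)| + |des.2 - (j : Int)|))).length = m
         ∧ ∀ r ∈ x.set y ((List.range n).map (fun (j : Nat) => |des.1 - (y : Int)| + |des.2 - (j : Int)|)), r.length = n) := by
    intro x y hinv hy
    obtain ⟨hl, hr⟩ := hinv
    have hym : y < m := List.mem_range.mp hy
    have hyx : y < x.length := by omega
    have hne : x ≠ [] := by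
      intro hc; rw [hc] at hl; simp at hl; omega
    have hhead : (x.headD []).length = n := by
      have hmem : x.headD [] ∈ x := by
        cases x with
        | nil => exact absurd rfl hne
        | cons a t => simp
      exact hr _ hmem
    have hrowmem : x.getD y [] ∈ x := by
      rw [List.getD_eq_getElem x [] hyx]
      exact List.getElem_mem hyx
    have hrowlen : (x.getD y []).length = n := hr _ hrowmem
    refine ⟨?_, ?_, ?_⟩
    · rw [hhead]
      simp only [Int.toNat_natCast]
      rw [foldl_set_nested y
        (fun (j : Int) (_ : Int) (r : List Int) =>
          r.set j.toNat (manhattan_Heuristic_Funct ((y : Int), j) des))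
        (PySem.List.pyRange 0 (n : Int) 1) x hyx]
      congr 1
      rw [pyRange_zero_cast n, List.foldl_map]
      simp only [Int.toNat_natCast]
      rw [foldl_set_prefix (fun (j : Nat) => manhattan_Heuristic_Funct ((y : Int), (j : Int)) des)
        n (x.getD y []) (by omega)]
      have hdr : (x.getD y []).drop n = [] := by
        rw [← hrowlen]; exact List.drop_length
      rw [hdr]
      simp [manhattan_Heuristic_Funct]
    · simp [hl]
    · intro r hrm
      rcases List.mem_or_eq_of_mem_set hrm with h1 | h1
      · exact hr _ h1
      · simp [h1]
  rw [foldl_congr_inv (fun h : List (List Int) => h.length = m ∧ ∀ r ∈ h, r.length = n)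
    _ _ (List.range m) h0 ⟨hlen, hrows⟩ hstep]
  rw [foldl_set_prefix _ m h0 (by omega)]
  have hd0 : h0.drop m = [] := by
    rw [← hlen]; exact List.drop_length
  rw [hd0]
  simp

-- characterisation of A's result
theorem heuristic_Matrix_eq (matrix : List (List Int)) (des : Int × Int) :
    heuristic_Matrix matrix des
      = (List.range matrix.length).map (fun (i : Nat) =>
          (List.range (matrix.headD []).length).map (fun (j : Nat) =>
            |des.1 - (i : Int)| + |des.2 - (j : Int)|)) := by
  unfold heuristic_Matrix
  have hzero : (PySem.List.pyRange 0 ((matrix.headD []).length : Int) 1).foldl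
      (fun r _ => r ++ [(0 : Int)]) [] = List.replicate (matrix.headD []).length 0 := by
    rw [foldl_append_const]
    simp [PySem.List.length_pyRange_one]
  rw [hzero, foldl_append_const]
  simp only [PySem.List.length_pyRange_one, List.nil_append, Int.sub_zero, Int.toNat_natCast]
  rw [List.length_replicate]
  exact phase2_eq des matrix.length (matrix.headD []).length _
    (by simp) (by intro r hrm; simp_all [List.eq_of_mem_replicate hrm])

-- ===== VERDICT (by name: the statement is the Claim_ definition above) =====
theorem heuristic_Matrix_spec : Claim_equal_heuristic_Matrix := by
  intro matrix des _
  unfold Spec_heuristic_Matrix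
  rw [heuristic_Matrix_eq, heuristic_Matrix_alt]
  by_cases hmat : matrix = []
  · simp [hmat]
  · simp only [hmat, if_false, List.map_map]
    refine List.map_congr_left (fun i _ => ?_)
    simp only [Function.comp_apply]
    refine List.map_congr_left (fun j _ => ?_)
    simp [Function.comp, abs_sub_comm]
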